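-- pv_equiv track=rewrite | github.com/cedadev/S3-netcdf-python | S3netCDF4/splitnc4.py | calculate_index_from_indices
-- ===== SOURCE A (Python) =====
-- def calculate_index_from_indices(indices, subfield_shape):
--     assert(len(indices) == len(subfield_shape))
--     # add the last index
--     idx = indices[-1]
--     # now loop backwards from the 2nd to last index to the first,
--     # adding the size of the field multiplied by the index
--     field_size = 1
--     for i in range(len(indices)-2, -1, -1):
--         # calculate the field size
--         field_size *= subfield_shape[i+1]
--         idx += indices[i] * field_size
--     return idx
-- ===== SOURCE B (Python) =====
-- def calculate_index_from_indices(indices, subfield_shape):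
--     assert(len(indices) == len(subfield_shape))
--     # forward Horner evaluation of the flat index: no field_size product,
--     # single left-to-right accumulator
--     idx = indices[0]
--     for sh, ix in zip(subfield_shape[1:], indices[1:]):
--         idx = idx * sh + ix
--     return idx
-- ===== Notes on version B (the rewrite author's own statement) =====
-- stated objective: simpler
-- what changed: Replaces the backward loop that maintains a separate running field_size product with a forward Horner evaluation over zip(subfield_shape[1:], indices[1:]) keeping only one accumulator.
import Mathlib
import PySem

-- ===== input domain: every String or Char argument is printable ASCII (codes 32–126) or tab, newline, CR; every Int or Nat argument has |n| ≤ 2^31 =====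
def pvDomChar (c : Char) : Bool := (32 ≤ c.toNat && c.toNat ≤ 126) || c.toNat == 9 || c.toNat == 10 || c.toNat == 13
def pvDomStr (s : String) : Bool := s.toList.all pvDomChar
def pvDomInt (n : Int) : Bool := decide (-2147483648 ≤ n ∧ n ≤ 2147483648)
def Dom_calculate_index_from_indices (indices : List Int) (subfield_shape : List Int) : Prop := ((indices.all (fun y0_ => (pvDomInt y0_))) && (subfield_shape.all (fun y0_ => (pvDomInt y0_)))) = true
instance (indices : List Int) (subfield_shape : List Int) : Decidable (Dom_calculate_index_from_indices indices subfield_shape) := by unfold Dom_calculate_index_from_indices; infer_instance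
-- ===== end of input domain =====

-- B replaces A's backward loop with its separate running field_size product by a
-- forward Horner evaluation with a single accumulator (objective: simpler).

-- ===== PORT A =====
-- literal port of A: idx = indices[-1]; field_size = 1;
-- for i in range(len(indices)-2, -1, -1): field_size *= subfield_shape[i+1]; idx += indices[i] * field_size
def calculate_index_from_indices (indices : List Int) (subfield_shape : List Int) : Int :=
  let idx0 : Int := PySem.List.pyGetD indices (-1) 0
  let st := (PySem.List.pyRange ((indices.length : Int) - 2) (-1) (-1)).foldl
    (fun (st : Int × Int) (i : Int) =>
      let fs := st.2 * PySem.List.pyGetD subfield_shape (i + 1) 0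
      (st.1 + PySem.List.pyGetD indices i 0 * fs, fs))
    (idx0, 1)
  st.1

-- ===== PORT B =====
-- literal port of B: idx = indices[0]; for sh, ix in zip(subfield_shape[1:], indices[1:]): idx = idx*sh + ix
-- (the slice [1:] is List.drop 1, exact for this nonnegative start)
def calculate_index_from_indices_alt (indices : List Int) (subfield_shape : List Int) : Int :=
  let idx0 : Int := PySem.List.pyGetD indices 0 0
  ((subfield_shape.drop 1).zip (indices.drop 1)).foldl
    (fun (idx : Int) (p : Int × Int) => idx * p.1 + p.2) idx0

-- ===== PRECONDITION & SPEC =====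
-- Pre_ excludes exactly the inputs where A raises: unequal lengths (AssertionError)
-- and empty indices (IndexError on indices[-1]); B raises on the same inputs.
def Pre_calculate_index_from_indices (indices : List Int) (subfield_shape : List Int) : Prop :=
  indices.length = subfield_shape.length ∧ indices ≠ []
instance (indices : List Int) (subfield_shape : List Int) : Decidable (Pre_calculate_index_from_indices indices subfield_shape) := by unfold Pre_calculate_index_from_indices; infer_instance

def pvWitness_calculate_index_from_indices : List Int × List Int := ([2, 3, 1], [4, 5, 6])

def Spec_calculate_index_from_indices (indices : List Int) (subfield_shape : List Int) (out : Int) : Prop := out = calculate_index_from_indices_alt indices subfield_shape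
instance (indices : List Int) (subfield_shape : List Int) (out : Int) : Decidable (Spec_calculate_index_from_indices indices subfield_shape out) := by unfold Spec_calculate_index_from_indices; infer_instance

-- ===== CLAIM (what is proved, stated in full; the proofs are below) =====
def Claim_equal_calculate_index_from_indices : Prop := ∀ (indices : List Int) (subfield_shape : List Int), Dom_calculate_index_from_indices indices subfield_shape → Pre_calculate_index_from_indices indices subfield_shape → Spec_calculate_index_from_indices indices subfield_shape (calculate_index_from_indices indices subfield_shape)

-- ===== LEMMAS AND PROOFS =====

-- A's loop body as a function of the index-lookup h and the shape-lookup f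
def pvStep (h f : Int → Int) (st : Int × Int) (i : Int) : Int × Int :=
  (st.1 + h i * (st.2 * f i), st.2 * f i)

-- the fold of A's loop body is affine in the initial state
theorem pvStep_lin (h f : Int → Int) (l : List Int) (p q : Int) :
    l.foldl (pvStep h f) (p, q)
      = (p + q * (l.foldl (pvStep h f) (0, 1)).1, q * (l.foldl (pvStep h f) (0, 1)).2) := by
  induction l generalizing p q with
  | nil => simp
  | cons a t ih =>
    simp only [List.foldl_cons]
    rw [show pvStep h f (p, q) a = (p + h a * (q * f a), q * f a) from rfl,
        show pvStep h f (0, 1) a = (0 + h a * (1 * f a), 1 * f a) from rfl,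
        ih (p + h a * (q * f a)) (q * f a),
        ih (0 + h a * (1 * f a)) (1 * f a)]
    simp only [Prod.mk.injEq]
    constructor <;> ring

theorem bodyA_eq (xs ys : List Int) :
    (fun (st : Int × Int) (i : Int) =>
      (st.1 + PySem.List.pyGetD xs i 0 * (st.2 * PySem.List.pyGetD ys (i + 1) 0),
       st.2 * PySem.List.pyGetD ys (i + 1) 0))
    = pvStep (fun i => PySem.List.pyGetD xs i 0) (fun i => PySem.List.pyGetD ys (i + 1) 0) := rfl

-- concat recurrence for port A
theorem lemA (t ys : List Int) (x y : Int) (ht : t ≠ []) (hlen : t.length = ys.length) :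
    calculate_index_from_indices (t ++ [x]) (ys ++ [y])
      = x + y * calculate_index_from_indices t ys := by
  have hm : 0 < t.length := List.length_pos_of_ne_nil ht
  unfold calculate_index_from_indices
  simp only [List.length_append, List.length_cons, List.length_nil]
  have hcast : ((t.length + 1 : Nat) : Int) - 2 = (t.length : Int) - 1 := by push_cast; ring
  rw [hcast]
  rw [PySem.List.pyRange_neg_one_cons (by omega : (-1:Int) < (t.length : Int) - 1)]
  rw [List.foldl_cons]
  have hcongr : ∀ (st : Int × Int), ∀ i ∈ PySem.List.pyRange ((t.length : Int) - 1 - 1) (-1) (-1),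
      (let fs := st.2 * PySem.List.pyGetD (ys ++ [y]) (i + 1) 0
       (st.1 + PySem.List.pyGetD (t ++ [x]) i 0 * fs, fs))
      = (let fs := st.2 * PySem.List.pyGetD ys (i + 1) 0
         (st.1 + PySem.List.pyGetD t i 0 * fs, fs)) := by
    intro st i hi
    rw [PySem.List.mem_pyRange_neg_one] at hi
    have h1 : PySem.List.pyGetD (t ++ [x]) i 0 = PySem.List.pyGetD t i 0 := by
      rw [PySem.List.pyGetD_eq_getElem (t ++ [x]) 0 (by omega) (by simp; try omega),
          PySem.List.pyGetD_eq_getElem t 0 (by omega) (by omega)]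
      exact List.getElem_append_left (by omega)
    have h2 : PySem.List.pyGetD (ys ++ [y]) (i + 1) 0 = PySem.List.pyGetD ys (i + 1) 0 := by
      rw [PySem.List.pyGetD_eq_getElem (ys ++ [y]) 0 (by omega) (by simp; try omega),
          PySem.List.pyGetD_eq_getElem ys 0 (by omega) (by omega)]
      exact List.getElem_append_left (by omega)
    simp only [h1, h2]
  rw [PySem.List.foldl_congr_mem _ _ _ _ hcongr]
  -- values of the first (i = len-1) loop step and of indices[-1]
  have e1 : PySem.List.pyGetD (t ++ [x]) (-1) 0 = x :=
    PySem.List.pyGetD_neg_one_append_singleton t x 0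
  have e2 : PySem.List.pyGetD (t ++ [x]) ((t.length : Int) - 1) 0 = t.getLast ht := by
    rw [PySem.List.pyGetD_eq_getElem (t ++ [x]) 0 (by omega) (by simp; try omega)]
    rw [List.getElem_append_left (by omega)]
    rw [List.getLast_eq_getElem]
    congr 1 <;> omega
  have e3 : PySem.List.pyGetD (ys ++ [y]) ((t.length : Int) - 1 + 1) 0 = y := by
    have : ((t.length : Int) - 1 + 1) = (ys.length : Int) := by omega
    rw [this, PySem.List.pyGetD_eq_getElem (ys ++ [y]) 0 (by omega) (by simp)]
    simp
  have e4 : PySem.List.pyGetD t (-1) 0 = t.getLast ht := PySem.List.pyGetD_neg_one t 0 ht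
  have hr : ((t.length : Int) - 1 - 1) = (t.length : Int) - 2 := by ring
  simp only [e1, e2, e3, e4, hr]
  rw [bodyA_eq t ys]
  conv_lhs => rw [pvStep_lin]
  conv_rhs => rw [pvStep_lin]
  ring

-- concat recurrence for port B
theorem lemB (t ys : List Int) (x y : Int) (ht : t ≠ []) (hlen : t.length = ys.length) :
    calculate_index_from_indices_alt (t ++ [x]) (ys ++ [y])
      = (calculate_index_from_indices_alt t ys) * y + x := by
  have hm : 0 < t.length := List.length_pos_of_ne_nil ht
  unfold calculate_index_from_indices_alt
  have h0 : PySem.List.pyGetD (t ++ [x]) 0 0 = PySem.List.pyGetD t 0 0 := by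
    cases t with
    | nil => exact absurd rfl ht
    | cons a s => simp [PySem.List.pyGetD_zero]
  rw [h0, List.drop_append_of_le_length (by omega), List.drop_append_of_le_length (by omega),
      List.zip_append (by simp [hlen])]
  simp

theorem ports_agree (xs : List Int) : ∀ ys : List Int, xs ≠ [] → xs.length = ys.length →
    calculate_index_from_indices xs ys = calculate_index_from_indices_alt xs ys := by
  induction xs using List.reverseRecOn with
  | nil => intro ys h; exact absurd rfl h
  | append_singleton t x ih =>
    intro ys _ hlen
    rcases List.eq_nil_or_concat ys with rfl | ⟨ys', y, rfl⟩
    · simp at hlen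
    simp only [List.concat_eq_append] at hlen ⊢
    by_cases ht : t = []
    · subst ht
      have hy : ys' = [] := by
        cases ys' with
        | nil => rfl
        | cons b bs => simp at hlen
      subst hy
      show calculate_index_from_indices [x] [y] = calculate_index_from_indices_alt [x] [y]
      unfold calculate_index_from_indices calculate_index_from_indices_alt
      rw [PySem.List.pyRange_neg_one_eq_nil (by norm_num)]
      simp [PySem.List.pyGetD_neg_one [x] 0 (by simp), PySem.List.pyGetD_zero]
    · have hlen' : t.length = ys'.length := by
        simp at hlen; omega
      rw [lemA t ys' x y ht hlen', lemB t ys' x y ht hlen', ih ys' ht hlen']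
      ring

-- ===== VERDICT (by name: the statement is the Claim_ definition above) =====
theorem calculate_index_from_indices_spec : Claim_equal_calculate_index_from_indices := by
  intro xs ys _ hpre
  exact ports_agree xs ys hpre.2 hpre.1
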